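-- pv_equiv track=rewrite | github.com/miliar/Code_Jam_Webscraper | solutions_python/Problem_207/713.py | solve_part
-- ===== SOURCE A (Python) =====
-- COLORS = 'ROYGBV'
--
-- ADJACENT = {'R': 'OV', 'O': 'RY', 'Y': 'OG', 'G': 'YB', 'B': 'GV', 'V': 'BG'}
--
-- def adjacent(start, target):
--   return (start is target) or (target in ADJACENT[start])
--
-- def can_be_next(start):
--   return [c for c in COLORS if not adjacent(start, c)]
--
-- def solve_part(cur, counts_by_color, final_key):
--   # print counts_by_color
--   if sum(counts_by_color.values()) == 0:
--     if cur == final_key: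
--       return [] # dont need to output the last one but glad we tried to find it
--     else:
--       return None
--
--   next_candidates = can_be_next(cur)
--
--   for candidate in sorted(next_candidates, key=lambda c: counts_by_color.get(c, 0) * -1):
--     # print next_candidates, counts_by_color, candidate
--     if counts_by_color.get(candidate, 0) == 0:
--       # we have exhausted the good options
--       return None
--
--     new_counts = dict(counts_by_color)
--     new_counts[candidate] -= 1
--     if new_counts[candidate] == 0:
--       del new_counts[candidate]
--     rest_solved = solve_part(candidate, new_counts, final_key)
--
--     if rest_solved is not None:
--       return [cur] + rest_solved
--     # otherwise keep trying with the other candidates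
--
--   return None # no good options
-- ===== SOURCE B (Python) =====
-- COLORS = 'ROYGBV'
--
-- ADJACENT = {'R': 'OV', 'O': 'RY', 'Y': 'OG', 'G': 'YB', 'B': 'GV', 'V': 'BG'}
--
-- def adjacent(start, target):
--   return (start is target) or (target in ADJACENT[start])
--
-- def can_be_next(start):
--   return [c for c in COLORS if not adjacent(start, c)]
--
-- def _candidates(start, counts):
--   return sorted(can_be_next(start), key=lambda c: counts.get(c, 0) * -1)
--
-- def solve_part(cur, counts_by_color, final_key):
--   # Iterative depth-first search with an explicit stack instead of recursion.
--   # A frame is (counts, path, cands): remaining candidate colors for the color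
--   # path[-1], with `counts` the counters still unused at that point.
--   if sum(counts_by_color.values()) == 0:
--     return [] if cur == final_key else None
--   stack = [(counts_by_color, [cur], _candidates(cur, counts_by_color))]
--   while stack:
--     counts, path, cands = stack.pop()
--     if not cands:
--       continue  # this frame is exhausted
--     c, rest = cands[0], cands[1:]
--     if counts.get(c, 0) == 0:
--       continue  # counts are sorted descending: nothing usable left in this frame
--     new = dict(counts)
--     new[c] -= 1
--     if new[c] == 0:
--       del new[c]
--     if sum(new.values()) == 0:
--       if c == final_key:
--         return path  # the last color is not part of the reported path
--       stack.append((counts, path, rest))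
--     else:
--       stack.append((counts, path, rest))
--       stack.append((new, path + [c], _candidates(c, new)))
--   return None
-- ===== Notes on version B (the rewrite author's own statement) =====
-- stated objective: alternative
-- what changed: A's recursive backtracking is re-decomposed as an iterative depth-first search driven by an explicit stack of (counts, path, remaining-candidates) frames that visits states in the identical order.
-- outside the precondition, e.g. on solve_part('Y', {'R': -1}, 'R'): A returns None, B returns None
import Mathlib
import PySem

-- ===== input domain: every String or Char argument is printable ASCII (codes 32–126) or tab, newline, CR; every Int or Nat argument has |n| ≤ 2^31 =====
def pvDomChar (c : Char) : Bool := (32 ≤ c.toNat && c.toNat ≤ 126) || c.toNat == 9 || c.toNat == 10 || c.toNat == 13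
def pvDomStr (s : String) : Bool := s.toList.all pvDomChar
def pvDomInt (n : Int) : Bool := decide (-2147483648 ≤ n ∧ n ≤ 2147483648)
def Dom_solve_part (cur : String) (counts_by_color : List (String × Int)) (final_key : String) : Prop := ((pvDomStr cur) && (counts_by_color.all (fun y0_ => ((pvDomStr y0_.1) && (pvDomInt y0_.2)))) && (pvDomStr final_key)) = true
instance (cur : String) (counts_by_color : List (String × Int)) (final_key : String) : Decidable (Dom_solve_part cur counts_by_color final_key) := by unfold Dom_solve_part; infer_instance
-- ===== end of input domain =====

-- B rewrites A's recursive backtracking as an iterative depth-first search over an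
-- explicit stack of frames (objective: alternative decomposition, same visit order).

-- ===== shared helpers (the module-level constants/helpers both Pythons use) =====

-- COLORS = 'ROYGBV', iterated characterwise as the 1-character strings below
def colorsL : List String := ["R", "O", "Y", "G", "B", "V"]

def ADJ : PySem.Dict String String :=
  PySem.Dict.mk [("R", "OV"), ("O", "RY"), ("Y", "OG"), ("G", "YB"), ("B", "GV"), ("V", "BG")]

-- adjacent(start, target): `start is target` is string equality here (both sides are
-- interned 1-char CPython strings whenever they can be identical); ADJACENT[start]
-- raises KeyError for start outside the table — Pre_ admits only inputs where the
-- lookup happens for start ∈ colorsL, on which `getD _ ""` is exact.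
def adjacentB (start target : String) : Bool :=
  (start == target) || PySem.Str.isIn target (ADJ.getD start "")

-- can_be_next(start) = [c for c in COLORS if not adjacent(start, c)]
def canBeNext (start : String) : List String :=
  colorsL.filter (fun c => ! adjacentB start c)

-- sorted(can_be_next(cur), key=lambda c: counts.get(c, 0) * -1)
def sortedCands (cur : String) (d : PySem.Dict String Int) : List String :=
  PySem.List.sorted (canBeNext cur) (fun c => d.getD c 0 * -1) false

-- sum(counts.values())
def sumVals (d : PySem.Dict String Int) : Int := d.values.sum

-- new = dict(counts); new[c] -= 1; if new[c] == 0: del new[c]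
-- (the key c is present whenever this runs: counts.get(c, 0) == 0 was just ruled out)
def decDel (d : PySem.Dict String Int) (c : String) : PySem.Dict String Int :=
  let v := d.getD c 0 - 1
  let nd := d.insert c v
  if v == 0 then nd.erase c else nd

-- total count of remaining color counters (clamped at 0); drives fuel/termination
def measureNat (d : PySem.Dict String Int) : Nat :=
  (colorsL.map (fun c => (d.getD c 0).toNat)).sum

-- ===== PORT A =====

-- the candidate `for` loop of solve_part; `recur` is the recursive call on (candidate, new_counts)
def loopA (recur : String → PySem.Dict String Int → Option (List String))
    (cur : String) (cands : List String) (d : PySem.Dict String Int) : Option (List String) :=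
  match cands with
  | [] => none
  | c :: cs =>
    if d.getD c 0 == 0 then none          -- "we have exhausted the good options"
    else
      match recur c (decDel d c) with
      | some r => some (cur :: r)
      | none => loopA recur cur cs d

-- solve_part with a fuel counter that only bounds the recursion depth; solve_part
-- below supplies fuel exceeding the depth of every terminating run (one counter is
-- consumed per nested call), so the fuel guard is a pure totality device.
def solveA (fuel : Nat) (cur : String) (d : PySem.Dict String Int) (fin : String) :
    Option (List String) :=
  match fuel with
  | 0 => none
  | f + 1 =>
    if sumVals d == 0 then (if cur == fin then some [] else none)
    else loopA (fun c nd => solveA f c nd fin) cur (sortedCands cur d) d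

def solve_part (cur : String) (counts_by_color : List (String × Int)) (final_key : String) :
    Option (List String) :=
  let d := PySem.Dict.mk counts_by_color
  solveA (measureNat d + 1) cur d final_key

-- ===== PORT B =====

-- termination weight of a stack of frames (proof device only, not part of B's Python)
def stackM (S : List (PySem.Dict String Int × List String × List String)) : Nat :=
  (S.map (fun f => (f.2.2.length + 1) * 8 ^ (measureNat f.1))).sum

lemma stackM_cons (d : PySem.Dict String Int) (p : List String) (cs : List String)
    (S : List (PySem.Dict String Int × List String × List String)) :
    stackM ((d, p, cs) :: S) = (cs.length + 1) * 8 ^ (measureNat d) + stackM S := rfl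

lemma pow8_pos (m : Nat) : 0 < 8 ^ m := Nat.pow_pos (by omega)

lemma push_weight_lt (len m' m : Nat) (hl : len ≤ 6) (hm : m' < m) :
    (len + 1) * 8 ^ m' < 8 ^ m := by
  calc (len + 1) * 8 ^ m' < 8 * 8 ^ m' := by
        have := pow8_pos m'; exact Nat.mul_lt_mul_of_lt_of_le (by omega) (le_refl _) this
    _ = 8 ^ (m' + 1) := by rw [pow_succ, Nat.mul_comm]
    _ ≤ 8 ^ m := Nat.pow_le_pow_right (by omega) (by omega)

lemma sortedCands_length_le (cur : String) (d : PySem.Dict String Int) :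
    (sortedCands cur d).length ≤ 6 := by
  unfold sortedCands canBeNext
  rw [PySem.List.length_sorted]
  exact le_trans (List.length_filter_le _ _) (by decide)

-- the DFS loop of B: pop the top frame, advance it, push child frames.
-- The `measureNat`-decrease guard (else-branch `none`) is a pure totality device: it
-- never fires when every color count is nonnegative (Pre_), where consuming a counter
-- strictly decreases measureNat.
def runB (stack : List (PySem.Dict String Int × List String × List String))
    (fin : String) : Option (List String) :=
  match stack with
  | [] => none
  | (d, path, cands) :: S =>
    match cands with
    | [] => runB S fin
    | c :: rest =>
      if d.getD c 0 == 0 then runB S fin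
      else
        if sumVals (decDel d c) == 0 then
          if c == fin then some path
          else runB ((d, path, rest) :: S) fin
        else
          if h : measureNat (decDel d c) < measureNat d then
            runB ((decDel d c, path ++ [c], sortedCands c (decDel d c)) :: (d, path, rest) :: S) fin
          else none
termination_by stackM stack
decreasing_by
  · simp only [stackM_cons]
    have := Nat.mul_pos (show 0 < List.length ([] : List String) + 1 by omega) (pow8_pos (measureNat d))
    omega
  · simp only [stackM_cons]
    have := Nat.mul_pos (show 0 < (c :: rest).length + 1 by omega) (pow8_pos (measureNat d))
    omega
  · simp only [stackM_cons, List.length_cons]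
    have hx : (rest.length + 1 + 1) * 8 ^ measureNat d
        = (rest.length + 1) * 8 ^ measureNat d + 8 ^ measureNat d := by ring
    have := pow8_pos (measureNat d)
    omega
  · simp only [stackM_cons, List.length_cons]
    have h1 := sortedCands_length_le c (decDel d c)
    have h2 := push_weight_lt (sortedCands c (decDel d c)).length (measureNat (decDel d c)) (measureNat d) h1 h
    have hx : (rest.length + 1 + 1) * 8 ^ measureNat d
        = (rest.length + 1) * 8 ^ measureNat d + 8 ^ measureNat d := by ring
    omega

def solve_part_alt (cur : String) (counts_by_color : List (String × Int)) (final_key : String) :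
    Option (List String) :=
  let d := PySem.Dict.mk counts_by_color
  if sumVals d == 0 then (if cur == final_key then some [] else none)
  else runB [(d, [cur], sortedCands cur d)] final_key

-- ===== PRECONDITION & SPEC =====

-- Pre_ excludes: (a) association lists with duplicate keys, which do not correspond
-- to a well-defined Python dict argument (first-vs-last value is anybody's choice);
-- (b) inputs with a negative count on some color — counts are outside the function's
-- natural domain there and A's decrementing recursion can run away below zero until
-- it dies with RecursionError (on part of this region A still returns quickly — see
-- cites); (c) inputs with sum != 0 and cur outside COLORS, where A raises KeyError
-- at ADJACENT[cur].
def Pre_solve_part (cur : String) (counts_by_color : List (String × Int)) (final_key : String) : Prop :=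
  (counts_by_color.map Prod.fst).Nodup ∧
  (∀ c ∈ colorsL, 0 ≤ (PySem.Dict.mk counts_by_color).getD c 0) ∧
  (sumVals (PySem.Dict.mk counts_by_color) = 0 ∨ cur ∈ colorsL)

instance (cur : String) (counts_by_color : List (String × Int)) (final_key : String) :
    Decidable (Pre_solve_part cur counts_by_color final_key) := by
  unfold Pre_solve_part; infer_instance

def pvWitness_solve_part : String × (List (String × Int)) × String := ("R", [("Y", 1)], "Y")

def Spec_solve_part (cur : String) (counts_by_color : List (String × Int)) (final_key : String) (out : Option (List String)) : Prop := out = solve_part_alt cur counts_by_color final_key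
instance (cur : String) (counts_by_color : List (String × Int)) (final_key : String) (out : Option (List String)) : Decidable (Spec_solve_part cur counts_by_color final_key out) := by unfold Spec_solve_part; infer_instance

-- ===== CLAIM (what is proved, stated in full; the proofs are below) =====
def Claim_equal_solve_part : Prop := ∀ (cur : String) (counts_by_color : List (String × Int)) (final_key : String), Dom_solve_part cur counts_by_color final_key → Pre_solve_part cur counts_by_color final_key → Spec_solve_part cur counts_by_color final_key (solve_part cur counts_by_color final_key)

-- ===== LEMMAS AND PROOFS =====

-- every color count nonnegative (the invariant Pre_ gives at the root)
def InvD (d : PySem.Dict String Int) : Prop := ∀ c ∈ colorsL, 0 ≤ d.getD c 0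

lemma find_filter_ne (items : List (String × Int)) (k k' : String) :
    (items.filter (fun p => !(p.1 == k))).find? (fun p => p.1 == k') =
    (if k' = k then none else items.find? (fun p => p.1 == k')) := by
  induction items with
  | nil => simp
  | cons p t ih =>
    by_cases h1 : p.1 = k <;> by_cases h2 : p.1 = k' <;> by_cases h3 : k' = k <;>
      simp_all

lemma getD_erase (d : PySem.Dict String Int) (k k' : String) (v : Int) :
    (d.erase k).getD k' v = if k' = k then v else d.getD k' v := by
  simp only [PySem.Dict.getD, PySem.Dict.get?, PySem.Dict.erase, find_filter_ne]
  split <;> simp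

lemma getD_decDel (d : PySem.Dict String Int) (c x : String) :
    (decDel d c).getD x 0 = if x = c then d.getD c 0 - 1 else d.getD x 0 := by
  unfold decDel
  by_cases hz : d.getD c 0 - 1 = 0
  · simp only [hz, beq_self_eq_true, if_true, getD_erase]
    by_cases hx : x = c
    · simp [hx]
    · simp [hx, PySem.Dict.getD_insert_of_ne _ _ _ hx]
  · have : ((d.getD c 0 - 1) == 0) = false := by simpa using hz
    simp only [this, Bool.false_eq_true, if_false]
    by_cases hx : x = c
    · simp [hx, PySem.Dict.getD_insert_self]
    · simp [hx, PySem.Dict.getD_insert_of_ne _ _ _ hx]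

lemma inv_decDel (d : PySem.Dict String Int) (c : String) (hd : InvD d)
    (hv : 1 ≤ d.getD c 0) : InvD (decDel d c) := by
  intro x hx
  rw [getD_decDel]
  split
  · omega
  · exact hd x hx

lemma measure_decDel (d : PySem.Dict String Int) (c : String) (hc : c ∈ colorsL)
    (hv : 1 ≤ d.getD c 0) : measureNat (decDel d c) + 1 = measureNat d := by
  simp only [colorsL, List.mem_cons, List.not_mem_nil, or_false] at hc
  rcases hc with rfl | rfl | rfl | rfl | rfl | rfl <;>
    · simp only [measureNat, colorsL, List.map_cons, List.map_nil, List.sum_cons,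
        List.sum_nil, getD_decDel, String.reduceEq, if_false, reduceIte]
      omega

lemma measure_pos (d : PySem.Dict String Int) (c : String) (hc : c ∈ colorsL)
    (hv : 1 ≤ d.getD c 0) : 1 ≤ measureNat d := by
  have := measure_decDel d c hc hv; omega

lemma sortedCands_subset (cur : String) (d : PySem.Dict String Int) :
    ∀ c ∈ sortedCands cur d, c ∈ colorsL := by
  intro c hc
  unfold sortedCands at hc
  rw [PySem.List.mem_sorted] at hc
  unfold canBeNext at hc
  exact (List.mem_filter.mp hc).1

-- the central simulation: one machine frame computes exactly A's candidate loop,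
-- and abandoning it resumes the rest of the stack
lemma solveA_succ (f : Nat) (cur : String) (d : PySem.Dict String Int) (fin : String) :
    solveA (f + 1) cur d fin =
      (if sumVals d == 0 then (if cur == fin then some [] else none)
       else loopA (fun c nd => solveA f c nd fin) cur (sortedCands cur d) d) := rfl

lemma runB_frame : ∀ (fA : Nat) (cands : List String) (d : PySem.Dict String Int)
    (cur : String) (pre : List String) (fin : String)
    (S : List (PySem.Dict String Int × List String × List String)),
    InvD d → measureNat d ≤ fA → (∀ c ∈ cands, c ∈ colorsL) →
    runB ((d, pre ++ [cur], cands) :: S) fin =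
      (match loopA (fun c nd => solveA fA c nd fin) cur cands d with
       | some r => some (pre ++ r)
       | none => runB S fin) := by
  intro fA
  induction fA using Nat.strong_induction_on with
  | _ fA ihf =>
  intro cands
  induction cands with
  | nil =>
    intro d cur pre fin S hInv hfA hsub
    simp only [loopA, runB]
  | cons c cs ihc =>
    intro d cur pre fin S hInv hfA hsub
    have hcCol : c ∈ colorsL := hsub c List.mem_cons_self
    have hsub' : ∀ x ∈ cs, x ∈ colorsL := fun x hx => hsub x (List.mem_cons_of_mem c hx)
    by_cases hz : (d.getD c 0 == 0) = true
    · rw [runB]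
      simp only [loopA, hz, if_true]
    · have hv : 1 ≤ d.getD c 0 := by
        have h0 := hInv c hcCol
        have hne : d.getD c 0 ≠ 0 := by simpa using hz
        omega
      have hμ1 : 1 ≤ measureNat d := measure_pos d c hcCol hv
      obtain ⟨f, rfl⟩ : ∃ f, fA = f + 1 := ⟨fA - 1, by omega⟩
      have hmd : measureNat (decDel d c) + 1 = measureNat d := measure_decDel d c hcCol hv
      have hInv' := inv_decDel d c hInv hv
      rw [runB]
      simp only [loopA, hz, Bool.false_eq_true, if_false]
      rw [solveA_succ]
      by_cases hs : (sumVals (decDel d c) == 0) = true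
      · simp only [hs, if_true]
        by_cases hf : (c == fin) = true
        · simp only [hf, if_true]
        · simp only [hf, Bool.false_eq_true, if_false]
          exact ihc d cur pre fin S hInv hfA hsub'
      · have hlt : measureNat (decDel d c) < measureNat d := by omega
        simp only [hs, Bool.false_eq_true, if_false, hlt, dif_pos]
        have hrec := ihf f (by omega) (sortedCands c (decDel d c)) (decDel d c) c
          (pre ++ [cur]) fin ((d, pre ++ [cur], cs) :: S) hInv' (by omega)
          (sortedCands_subset c (decDel d c))
        rw [hrec]
        cases hL : loopA (fun c' nd => solveA f c' nd fin) c (sortedCands c (decDel d c))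
            (decDel d c) with
        | some r => simp [List.append_assoc]
        | none =>
          simp only []
          exact ihc d cur pre fin S hInv hfA hsub'

-- ===== VERDICT (by name: the statement is the Claim_ definition above) =====
theorem solve_part_spec : Claim_equal_solve_part := by
  intro cur counts fin _ hpre
  obtain ⟨-, hinv, -⟩ := hpre
  unfold Spec_solve_part solve_part solve_part_alt
  set d := PySem.Dict.mk counts with hd
  by_cases hs : sumVals d == 0
  · simp only [solveA, hs, if_true]
  · simp only [solveA, hs, if_false, Bool.false_eq_true]
    have := runB_frame (measureNat d) (sortedCands cur d) d cur [] fin []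
      hinv (le_refl _) (sortedCands_subset cur d)
    simp only [List.nil_append] at this
    rw [this]
    cases loopA (fun c nd => solveA (measureNat d) c nd fin) cur (sortedCands cur d) d with
    | none => simp [runB]
    | some r => simp
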